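-- pv_equiv track=rewrite | github.com/Appolloyon/Rediting | editing_details.py | base_transition
-- ===== SOURCE A (Python) =====
-- def base_transition(seq1, seq2):
--     transdict = {'a_t':0, 'a_g':0, 'a_c':0,
--             't_a':0, 't_g':0, 't_c':0,
--             'g_a':0, 'g_t':0, 'g_c':0,
--             'c_a':0, 'c_t':0, 'c_g':0}
--     for i, (b1, b2) in enumerate(zip(seq1, seq2)):
--         if b1 == b2:
--             pass
--         elif b1 == "A" and b2 == "T":
--             transdict['a_t'] += 1
--         elif b1 == "A" and b2 == "G":
--             transdict['a_g'] += 1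
--         elif b1 == "A" and b2 == "C":
--             transdict['a_c'] += 1
--         elif b1 == "T" and b2 == "A":
--             transdict['t_a'] += 1
--         elif b1 == "T" and b2 == "G":
--             transdict['t_g'] += 1
--         elif b1 == "T" and b2 == "C":
--             transdict['t_c'] += 1
--         elif b1 == "G" and b2 == "A":
--             transdict['g_a'] += 1
--         elif b1 == "G" and b2 == "T":
--             transdict['g_t'] += 1
--         elif b1 == "G" and b2 == "C":
--             transdict['g_c'] += 1
--         elif b1 == "C" and b2 == "A":
--             transdict['c_a'] += 1
--         elif b1 == "C" and b2 == "T":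
--             transdict['c_t'] += 1
--         elif b1 == "C" and b2 == "G":
--             transdict['c_g'] += 1
--         else:
--             pass
--     return transdict
-- ===== SOURCE B (Python) =====
-- def base_transition(seq1, seq2):
--     from collections import Counter
--     counts = Counter(zip(seq1, seq2))
--     pairs = [('a_t', ('A', 'T')), ('a_g', ('A', 'G')), ('a_c', ('A', 'C')),
--              ('t_a', ('T', 'A')), ('t_g', ('T', 'G')), ('t_c', ('T', 'C')),
--              ('g_a', ('G', 'A')), ('g_t', ('G', 'T')), ('g_c', ('G', 'C')),
--              ('c_a', ('C', 'A')), ('c_t', ('C', 'T')), ('c_g', ('C', 'G'))]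
--     return {name: counts[p] for name, p in pairs}
-- ===== Notes on version B (the rewrite author's own statement) =====
-- stated objective: idiomatic
-- what changed: Replaces A's running dict updated through a 13-branch if/elif ladder by a single collections.Counter pass over the zipped pairs followed by a projection of the 12 substitution pairs into the result dict.
import Mathlib
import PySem

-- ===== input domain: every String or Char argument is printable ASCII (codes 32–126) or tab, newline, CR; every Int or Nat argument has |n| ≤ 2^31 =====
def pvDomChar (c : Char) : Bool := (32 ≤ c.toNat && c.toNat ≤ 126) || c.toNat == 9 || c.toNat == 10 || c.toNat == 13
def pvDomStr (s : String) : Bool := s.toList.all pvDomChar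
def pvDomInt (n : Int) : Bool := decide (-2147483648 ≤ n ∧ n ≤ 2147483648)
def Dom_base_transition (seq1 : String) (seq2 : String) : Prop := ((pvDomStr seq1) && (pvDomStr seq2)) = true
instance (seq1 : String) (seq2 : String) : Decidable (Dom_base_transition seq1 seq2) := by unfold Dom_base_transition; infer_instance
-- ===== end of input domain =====

-- B replaces A's 12-branch elif ladder by one Counter pass over the zipped pairs followed by a
-- 12-key projection (objective: idiomatic; same O(n) cost).

-- ===== PORT A =====
-- one loop iteration of A's elif ladder (i from enumerate is unused by A's body)
def base_transition_step (d : PySem.Dict String Int) (p : Char × Char) : PySem.Dict String Int :=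
  if p.1 == p.2 then d
  else if p.1 == 'A' && p.2 == 'T' then d.modify "a_t" 0 (· + 1)
  else if p.1 == 'A' && p.2 == 'G' then d.modify "a_g" 0 (· + 1)
  else if p.1 == 'A' && p.2 == 'C' then d.modify "a_c" 0 (· + 1)
  else if p.1 == 'T' && p.2 == 'A' then d.modify "t_a" 0 (· + 1)
  else if p.1 == 'T' && p.2 == 'G' then d.modify "t_g" 0 (· + 1)
  else if p.1 == 'T' && p.2 == 'C' then d.modify "t_c" 0 (· + 1)
  else if p.1 == 'G' && p.2 == 'A' then d.modify "g_a" 0 (· + 1)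
  else if p.1 == 'G' && p.2 == 'T' then d.modify "g_t" 0 (· + 1)
  else if p.1 == 'G' && p.2 == 'C' then d.modify "g_c" 0 (· + 1)
  else if p.1 == 'C' && p.2 == 'A' then d.modify "c_a" 0 (· + 1)
  else if p.1 == 'C' && p.2 == 'T' then d.modify "c_t" 0 (· + 1)
  else if p.1 == 'C' && p.2 == 'G' then d.modify "c_g" 0 (· + 1)
  else d

def base_transition (seq1 : String) (seq2 : String) : List (String × Int) :=
  let transdict : PySem.Dict String Int := PySem.Dict.ofList
    [("a_t", 0), ("a_g", 0), ("a_c", 0), ("t_a", 0), ("t_g", 0), ("t_c", 0),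
     ("g_a", 0), ("g_t", 0), ("g_c", 0), ("c_a", 0), ("c_t", 0), ("c_g", 0)]
  ((PySem.List.enumerate (seq1.toList.zip seq2.toList)).foldl
      (fun d ip => base_transition_step d ip.2) transdict).items

-- ===== PORT B =====
def base_transition_pairs : List (String × (Char × Char)) :=
  [("a_t", ('A', 'T')), ("a_g", ('A', 'G')), ("a_c", ('A', 'C')),
   ("t_a", ('T', 'A')), ("t_g", ('T', 'G')), ("t_c", ('T', 'C')),
   ("g_a", ('G', 'A')), ("g_t", ('G', 'T')), ("g_c", ('G', 'C')),
   ("c_a", ('C', 'A')), ("c_t", ('C', 'T')), ("c_g", ('C', 'G'))]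

def base_transition_alt (seq1 : String) (seq2 : String) : List (String × Int) :=
  let counts : PySem.Dict (Char × Char) Int := PySem.Dict.counter (seq1.toList.zip seq2.toList)
  base_transition_pairs.map (fun np => (np.1, counts.getD np.2 0))

-- ===== PRECONDITION & SPEC =====
def Spec_base_transition (seq1 : String) (seq2 : String) (out : List (String × Int)) : Prop := out = base_transition_alt seq1 seq2
instance (seq1 : String) (seq2 : String) (out : List (String × Int)) : Decidable (Spec_base_transition seq1 seq2 out) := by unfold Spec_base_transition; infer_instance

-- ===== CLAIM (what is proved, stated in full; the proofs are below) =====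
def Claim_equal_base_transition : Prop := ∀ (seq1 : String) (seq2 : String), Dom_base_transition seq1 seq2 → Spec_base_transition seq1 seq2 (base_transition seq1 seq2)

-- ===== LEMMAS AND PROOFS =====

theorem count_cons_eqpair {x a b : Char} (hab : a ≠ b) (ps : List (Char × Char)) :
    List.count (a, b) ((x, x) :: ps) = List.count (a, b) ps := by
  simp only [List.count_cons]
  have : ((x, x) == (a, b)) = false := by
    simp only [beq_eq_false_iff_ne, ne_eq, Prod.mk.injEq, not_and]
    intro h1 h2; exact hab (h1 ▸ h2 ▸ rfl)
  simp [this]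

theorem base_transition_invariant (ps : List (Char × Char))
    (n1 n2 n3 n4 n5 n6 n7 n8 n9 n10 n11 n12 : Int) :
    (ps.foldl base_transition_step (PySem.Dict.mk
      [("a_t", n1), ("a_g", n2), ("a_c", n3), ("t_a", n4), ("t_g", n5), ("t_c", n6),
       ("g_a", n7), ("g_t", n8), ("g_c", n9), ("c_a", n10), ("c_t", n11), ("c_g", n12)])).items
    = [("a_t", n1 + ps.count ('A', 'T')), ("a_g", n2 + ps.count ('A', 'G')),
       ("a_c", n3 + ps.count ('A', 'C')), ("t_a", n4 + ps.count ('T', 'A')),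
       ("t_g", n5 + ps.count ('T', 'G')), ("t_c", n6 + ps.count ('T', 'C')),
       ("g_a", n7 + ps.count ('G', 'A')), ("g_t", n8 + ps.count ('G', 'T')),
       ("g_c", n9 + ps.count ('G', 'C')), ("c_a", n10 + ps.count ('C', 'A')),
       ("c_t", n11 + ps.count ('C', 'T')), ("c_g", n12 + ps.count ('C', 'G'))] := by
  induction ps generalizing n1 n2 n3 n4 n5 n6 n7 n8 n9 n10 n11 n12 with
  | nil => simp
  | cons p ps ih =>
    obtain ⟨b1, b2⟩ := p
    rw [List.foldl_cons]
    by_cases h0 : b1 = b2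
    · subst h0
      rw [show base_transition_step (PySem.Dict.mk [("a_t", n1), ("a_g", n2), ("a_c", n3), ("t_a", n4), ("t_g", n5), ("t_c", n6), ("g_a", n7), ("g_t", n8), ("g_c", n9), ("c_a", n10), ("c_t", n11), ("c_g", n12)]) (b1, b1) = PySem.Dict.mk [("a_t", n1), ("a_g", n2), ("a_c", n3), ("t_a", n4), ("t_g", n5), ("t_c", n6), ("g_a", n7), ("g_t", n8), ("g_c", n9), ("c_a", n10), ("c_t", n11), ("c_g", n12)] from by simp [base_transition_step]]
      rw [ih]
      rw [count_cons_eqpair (a := 'A') (b := 'T') (by decide) ps]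
      rw [count_cons_eqpair (a := 'A') (b := 'G') (by decide) ps]
      rw [count_cons_eqpair (a := 'A') (b := 'C') (by decide) ps]
      rw [count_cons_eqpair (a := 'T') (b := 'A') (by decide) ps]
      rw [count_cons_eqpair (a := 'T') (b := 'G') (by decide) ps]
      rw [count_cons_eqpair (a := 'T') (b := 'C') (by decide) ps]
      rw [count_cons_eqpair (a := 'G') (b := 'A') (by decide) ps]
      rw [count_cons_eqpair (a := 'G') (b := 'T') (by decide) ps]
      rw [count_cons_eqpair (a := 'G') (b := 'C') (by decide) ps]
      rw [count_cons_eqpair (a := 'C') (b := 'A') (by decide) ps]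
      rw [count_cons_eqpair (a := 'C') (b := 'T') (by decide) ps]
      rw [count_cons_eqpair (a := 'C') (b := 'G') (by decide) ps]
    by_cases h1 : b1 = 'A' ∧ b2 = 'T'
    · obtain ⟨rfl, rfl⟩ := h1
      rw [show base_transition_step (PySem.Dict.mk [("a_t", n1), ("a_g", n2), ("a_c", n3), ("t_a", n4), ("t_g", n5), ("t_c", n6), ("g_a", n7), ("g_t", n8), ("g_c", n9), ("c_a", n10), ("c_t", n11), ("c_g", n12)]) (('A' : Char), ('T' : Char)) = PySem.Dict.mk [("a_t", n1 + 1), ("a_g", n2), ("a_c", n3), ("t_a", n4), ("t_g", n5), ("t_c", n6), ("g_a", n7), ("g_t", n8), ("g_c", n9), ("c_a", n10), ("c_t", n11), ("c_g", n12)] from by simp [base_transition_step, PySem.Dict.modify, PySem.Dict.get?, PySem.Dict.insert, PySem.Dict.getD, PySem.Dict.contains]]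
      rw [ih]
      simp only [List.count_cons, List.cons.injEq, Prod.mk.injEq, beq_iff_eq]
      norm_num
      try omega
    by_cases h2 : b1 = 'A' ∧ b2 = 'G'
    · obtain ⟨rfl, rfl⟩ := h2
      rw [show base_transition_step (PySem.Dict.mk [("a_t", n1), ("a_g", n2), ("a_c", n3), ("t_a", n4), ("t_g", n5), ("t_c", n6), ("g_a", n7), ("g_t", n8), ("g_c", n9), ("c_a", n10), ("c_t", n11), ("c_g", n12)]) (('A' : Char), ('G' : Char)) = PySem.Dict.mk [("a_t", n1), ("a_g", n2 + 1), ("a_c", n3), ("t_a", n4), ("t_g", n5), ("t_c", n6), ("g_a", n7), ("g_t", n8), ("g_c", n9), ("c_a", n10), ("c_t", n11), ("c_g", n12)] from by simp [base_transition_step, PySem.Dict.modify, PySem.Dict.get?, PySem.Dict.insert, PySem.Dict.getD, PySem.Dict.contains]]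
      rw [ih]
      simp only [List.count_cons, List.cons.injEq, Prod.mk.injEq, beq_iff_eq]
      norm_num
      try omega
    by_cases h3 : b1 = 'A' ∧ b2 = 'C'
    · obtain ⟨rfl, rfl⟩ := h3
      rw [show base_transition_step (PySem.Dict.mk [("a_t", n1), ("a_g", n2), ("a_c", n3), ("t_a", n4), ("t_g", n5), ("t_c", n6), ("g_a", n7), ("g_t", n8), ("g_c", n9), ("c_a", n10), ("c_t", n11), ("c_g", n12)]) (('A' : Char), ('C' : Char)) = PySem.Dict.mk [("a_t", n1), ("a_g", n2), ("a_c", n3 + 1), ("t_a", n4), ("t_g", n5), ("t_c", n6), ("g_a", n7), ("g_t", n8), ("g_c", n9), ("c_a", n10), ("c_t", n11), ("c_g", n12)] from by simp [base_transition_step, PySem.Dict.modify, PySem.Dict.get?, PySem.Dict.insert, PySem.Dict.getD, PySem.Dict.contains]]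
      rw [ih]
      simp only [List.count_cons, List.cons.injEq, Prod.mk.injEq, beq_iff_eq]
      norm_num
      try omega
    by_cases h4 : b1 = 'T' ∧ b2 = 'A'
    · obtain ⟨rfl, rfl⟩ := h4
      rw [show base_transition_step (PySem.Dict.mk [("a_t", n1), ("a_g", n2), ("a_c", n3), ("t_a", n4), ("t_g", n5), ("t_c", n6), ("g_a", n7), ("g_t", n8), ("g_c", n9), ("c_a", n10), ("c_t", n11), ("c_g", n12)]) (('T' : Char), ('A' : Char)) = PySem.Dict.mk [("a_t", n1), ("a_g", n2), ("a_c", n3), ("t_a", n4 + 1), ("t_g", n5), ("t_c", n6), ("g_a", n7), ("g_t", n8), ("g_c", n9), ("c_a", n10), ("c_t", n11), ("c_g", n12)] from by simp [base_transition_step, PySem.Dict.modify, PySem.Dict.get?, PySem.Dict.insert, PySem.Dict.getD, PySem.Dict.contains]]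
      rw [ih]
      simp only [List.count_cons, List.cons.injEq, Prod.mk.injEq, beq_iff_eq]
      norm_num
      try omega
    by_cases h5 : b1 = 'T' ∧ b2 = 'G'
    · obtain ⟨rfl, rfl⟩ := h5
      rw [show base_transition_step (PySem.Dict.mk [("a_t", n1), ("a_g", n2), ("a_c", n3), ("t_a", n4), ("t_g", n5), ("t_c", n6), ("g_a", n7), ("g_t", n8), ("g_c", n9), ("c_a", n10), ("c_t", n11), ("c_g", n12)]) (('T' : Char), ('G' : Char)) = PySem.Dict.mk [("a_t", n1), ("a_g", n2), ("a_c", n3), ("t_a", n4), ("t_g", n5 + 1), ("t_c", n6), ("g_a", n7), ("g_t", n8), ("g_c", n9), ("c_a", n10), ("c_t", n11), ("c_g", n12)] from by simp [base_transition_step, PySem.Dict.modify, PySem.Dict.get?, PySem.Dict.insert, PySem.Dict.getD, PySem.Dict.contains]]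
      rw [ih]
      simp only [List.count_cons, List.cons.injEq, Prod.mk.injEq, beq_iff_eq]
      norm_num
      try omega
    by_cases h6 : b1 = 'T' ∧ b2 = 'C'
    · obtain ⟨rfl, rfl⟩ := h6
      rw [show base_transition_step (PySem.Dict.mk [("a_t", n1), ("a_g", n2), ("a_c", n3), ("t_a", n4), ("t_g", n5), ("t_c", n6), ("g_a", n7), ("g_t", n8), ("g_c", n9), ("c_a", n10), ("c_t", n11), ("c_g", n12)]) (('T' : Char), ('C' : Char)) = PySem.Dict.mk [("a_t", n1), ("a_g", n2), ("a_c", n3), ("t_a", n4), ("t_g", n5), ("t_c", n6 + 1), ("g_a", n7), ("g_t", n8), ("g_c", n9), ("c_a", n10), ("c_t", n11), ("c_g", n12)] from by simp [base_transition_step, PySem.Dict.modify, PySem.Dict.get?, PySem.Dict.insert, PySem.Dict.getD, PySem.Dict.contains]]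
      rw [ih]
      simp only [List.count_cons, List.cons.injEq, Prod.mk.injEq, beq_iff_eq]
      norm_num
      try omega
    by_cases h7 : b1 = 'G' ∧ b2 = 'A'
    · obtain ⟨rfl, rfl⟩ := h7
      rw [show base_transition_step (PySem.Dict.mk [("a_t", n1), ("a_g", n2), ("a_c", n3), ("t_a", n4), ("t_g", n5), ("t_c", n6), ("g_a", n7), ("g_t", n8), ("g_c", n9), ("c_a", n10), ("c_t", n11), ("c_g", n12)]) (('G' : Char), ('A' : Char)) = PySem.Dict.mk [("a_t", n1), ("a_g", n2), ("a_c", n3), ("t_a", n4), ("t_g", n5), ("t_c", n6), ("g_a", n7 + 1), ("g_t", n8), ("g_c", n9), ("c_a", n10), ("c_t", n11), ("c_g", n12)] from by simp [base_transition_step, PySem.Dict.modify, PySem.Dict.get?, PySem.Dict.insert, PySem.Dict.getD, PySem.Dict.contains]]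
      rw [ih]
      simp only [List.count_cons, List.cons.injEq, Prod.mk.injEq, beq_iff_eq]
      norm_num
      try omega
    by_cases h8 : b1 = 'G' ∧ b2 = 'T'
    · obtain ⟨rfl, rfl⟩ := h8
      rw [show base_transition_step (PySem.Dict.mk [("a_t", n1), ("a_g", n2), ("a_c", n3), ("t_a", n4), ("t_g", n5), ("t_c", n6), ("g_a", n7), ("g_t", n8), ("g_c", n9), ("c_a", n10), ("c_t", n11), ("c_g", n12)]) (('G' : Char), ('T' : Char)) = PySem.Dict.mk [("a_t", n1), ("a_g", n2), ("a_c", n3), ("t_a", n4), ("t_g", n5), ("t_c", n6), ("g_a", n7), ("g_t", n8 + 1), ("g_c", n9), ("c_a", n10), ("c_t", n11), ("c_g", n12)] from by simp [base_transition_step, PySem.Dict.modify, PySem.Dict.get?, PySem.Dict.insert, PySem.Dict.getD, PySem.Dict.contains]]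
      rw [ih]
      simp only [List.count_cons, List.cons.injEq, Prod.mk.injEq, beq_iff_eq]
      norm_num
      try omega
    by_cases h9 : b1 = 'G' ∧ b2 = 'C'
    · obtain ⟨rfl, rfl⟩ := h9
      rw [show base_transition_step (PySem.Dict.mk [("a_t", n1), ("a_g", n2), ("a_c", n3), ("t_a", n4), ("t_g", n5), ("t_c", n6), ("g_a", n7), ("g_t", n8), ("g_c", n9), ("c_a", n10), ("c_t", n11), ("c_g", n12)]) (('G' : Char), ('C' : Char)) = PySem.Dict.mk [("a_t", n1), ("a_g", n2), ("a_c", n3), ("t_a", n4), ("t_g", n5), ("t_c", n6), ("g_a", n7), ("g_t", n8), ("g_c", n9 + 1), ("c_a", n10), ("c_t", n11), ("c_g", n12)] from by simp [base_transition_step, PySem.Dict.modify, PySem.Dict.get?, PySem.Dict.insert, PySem.Dict.getD, PySem.Dict.contains]]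
      rw [ih]
      simp only [List.count_cons, List.cons.injEq, Prod.mk.injEq, beq_iff_eq]
      norm_num
      try omega
    by_cases h10 : b1 = 'C' ∧ b2 = 'A'
    · obtain ⟨rfl, rfl⟩ := h10
      rw [show base_transition_step (PySem.Dict.mk [("a_t", n1), ("a_g", n2), ("a_c", n3), ("t_a", n4), ("t_g", n5), ("t_c", n6), ("g_a", n7), ("g_t", n8), ("g_c", n9), ("c_a", n10), ("c_t", n11), ("c_g", n12)]) (('C' : Char), ('A' : Char)) = PySem.Dict.mk [("a_t", n1), ("a_g", n2), ("a_c", n3), ("t_a", n4), ("t_g", n5), ("t_c", n6), ("g_a", n7), ("g_t", n8), ("g_c", n9), ("c_a", n10 + 1), ("c_t", n11), ("c_g", n12)] from by simp [base_transition_step, PySem.Dict.modify, PySem.Dict.get?, PySem.Dict.insert, PySem.Dict.getD, PySem.Dict.contains]]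
      rw [ih]
      simp only [List.count_cons, List.cons.injEq, Prod.mk.injEq, beq_iff_eq]
      norm_num
      try omega
    by_cases h11 : b1 = 'C' ∧ b2 = 'T'
    · obtain ⟨rfl, rfl⟩ := h11
      rw [show base_transition_step (PySem.Dict.mk [("a_t", n1), ("a_g", n2), ("a_c", n3), ("t_a", n4), ("t_g", n5), ("t_c", n6), ("g_a", n7), ("g_t", n8), ("g_c", n9), ("c_a", n10), ("c_t", n11), ("c_g", n12)]) (('C' : Char), ('T' : Char)) = PySem.Dict.mk [("a_t", n1), ("a_g", n2), ("a_c", n3), ("t_a", n4), ("t_g", n5), ("t_c", n6), ("g_a", n7), ("g_t", n8), ("g_c", n9), ("c_a", n10), ("c_t", n11 + 1), ("c_g", n12)] from by simp [base_transition_step, PySem.Dict.modify, PySem.Dict.get?, PySem.Dict.insert, PySem.Dict.getD, PySem.Dict.contains]]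
      rw [ih]
      simp only [List.count_cons, List.cons.injEq, Prod.mk.injEq, beq_iff_eq]
      norm_num
      try omega
    by_cases h12 : b1 = 'C' ∧ b2 = 'G'
    · obtain ⟨rfl, rfl⟩ := h12
      rw [show base_transition_step (PySem.Dict.mk [("a_t", n1), ("a_g", n2), ("a_c", n3), ("t_a", n4), ("t_g", n5), ("t_c", n6), ("g_a", n7), ("g_t", n8), ("g_c", n9), ("c_a", n10), ("c_t", n11), ("c_g", n12)]) (('C' : Char), ('G' : Char)) = PySem.Dict.mk [("a_t", n1), ("a_g", n2), ("a_c", n3), ("t_a", n4), ("t_g", n5), ("t_c", n6), ("g_a", n7), ("g_t", n8), ("g_c", n9), ("c_a", n10), ("c_t", n11), ("c_g", n12 + 1)] from by simp [base_transition_step, PySem.Dict.modify, PySem.Dict.get?, PySem.Dict.insert, PySem.Dict.getD, PySem.Dict.contains]]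
      rw [ih]
      simp only [List.count_cons, List.cons.injEq, Prod.mk.injEq, beq_iff_eq]
      norm_num
      try omega
    rw [show base_transition_step (PySem.Dict.mk [("a_t", n1), ("a_g", n2), ("a_c", n3), ("t_a", n4), ("t_g", n5), ("t_c", n6), ("g_a", n7), ("g_t", n8), ("g_c", n9), ("c_a", n10), ("c_t", n11), ("c_g", n12)]) (b1, b2) = PySem.Dict.mk [("a_t", n1), ("a_g", n2), ("a_c", n3), ("t_a", n4), ("t_g", n5), ("t_c", n6), ("g_a", n7), ("g_t", n8), ("g_c", n9), ("c_a", n10), ("c_t", n11), ("c_g", n12)] from by simp [base_transition_step, h0, h1, h2, h3, h4, h5, h6, h7, h8, h9, h10, h11, h12]]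
    rw [ih]
    have c1 : ((b1, b2) == (('A' : Char), ('T' : Char))) = false := by simpa [beq_eq_false_iff_ne, ne_eq, Prod.mk.injEq, not_and] using fun hx hy => h1 ⟨hx, hy⟩
    have c2 : ((b1, b2) == (('A' : Char), ('G' : Char))) = false := by simpa [beq_eq_false_iff_ne, ne_eq, Prod.mk.injEq, not_and] using fun hx hy => h2 ⟨hx, hy⟩
    have c3 : ((b1, b2) == (('A' : Char), ('C' : Char))) = false := by simpa [beq_eq_false_iff_ne, ne_eq, Prod.mk.injEq, not_and] using fun hx hy => h3 ⟨hx, hy⟩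
    have c4 : ((b1, b2) == (('T' : Char), ('A' : Char))) = false := by simpa [beq_eq_false_iff_ne, ne_eq, Prod.mk.injEq, not_and] using fun hx hy => h4 ⟨hx, hy⟩
    have c5 : ((b1, b2) == (('T' : Char), ('G' : Char))) = false := by simpa [beq_eq_false_iff_ne, ne_eq, Prod.mk.injEq, not_and] using fun hx hy => h5 ⟨hx, hy⟩
    have c6 : ((b1, b2) == (('T' : Char), ('C' : Char))) = false := by simpa [beq_eq_false_iff_ne, ne_eq, Prod.mk.injEq, not_and] using fun hx hy => h6 ⟨hx, hy⟩
    have c7 : ((b1, b2) == (('G' : Char), ('A' : Char))) = false := by simpa [beq_eq_false_iff_ne, ne_eq, Prod.mk.injEq, not_and] using fun hx hy => h7 ⟨hx, hy⟩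
    have c8 : ((b1, b2) == (('G' : Char), ('T' : Char))) = false := by simpa [beq_eq_false_iff_ne, ne_eq, Prod.mk.injEq, not_and] using fun hx hy => h8 ⟨hx, hy⟩
    have c9 : ((b1, b2) == (('G' : Char), ('C' : Char))) = false := by simpa [beq_eq_false_iff_ne, ne_eq, Prod.mk.injEq, not_and] using fun hx hy => h9 ⟨hx, hy⟩
    have c10 : ((b1, b2) == (('C' : Char), ('A' : Char))) = false := by simpa [beq_eq_false_iff_ne, ne_eq, Prod.mk.injEq, not_and] using fun hx hy => h10 ⟨hx, hy⟩
    have c11 : ((b1, b2) == (('C' : Char), ('T' : Char))) = false := by simpa [beq_eq_false_iff_ne, ne_eq, Prod.mk.injEq, not_and] using fun hx hy => h11 ⟨hx, hy⟩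
    have c12 : ((b1, b2) == (('C' : Char), ('G' : Char))) = false := by simpa [beq_eq_false_iff_ne, ne_eq, Prod.mk.injEq, not_and] using fun hx hy => h12 ⟨hx, hy⟩
    simp [List.count_cons, c1, c2, c3, c4, c5, c6, c7, c8, c9, c10, c11, c12]

theorem foldl_enumerate_snd {α β : Type} (f : β → α → β) (xs : List α) :
    ∀ (s : Int) (b : β), (PySem.List.enumerate xs s).foldl (fun d ip => f d ip.2) b = xs.foldl f b := by
  induction xs with
  | nil => intro s b; simp [PySem.List.enumerate_nil]
  | cons x xs ih => intro s b; simp [PySem.List.enumerate_cons, ih]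

-- ===== VERDICT (by name: the statement is the Claim_ definition above) =====
theorem base_transition_spec : Claim_equal_base_transition := by
  intro seq1 seq2 _
  unfold Spec_base_transition base_transition base_transition_alt
  dsimp only
  rw [foldl_enumerate_snd]
  rw [show (PySem.Dict.ofList
    [("a_t", (0:Int)), ("a_g", 0), ("a_c", 0), ("t_a", 0), ("t_g", 0), ("t_c", 0),
     ("g_a", 0), ("g_t", 0), ("g_c", 0), ("c_a", 0), ("c_t", 0), ("c_g", 0)] : PySem.Dict String Int)
    = PySem.Dict.mk
    [("a_t", 0), ("a_g", 0), ("a_c", 0), ("t_a", 0), ("t_g", 0), ("t_c", 0),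
     ("g_a", 0), ("g_t", 0), ("g_c", 0), ("c_a", 0), ("c_t", 0), ("c_g", 0)] from by decide]
  rw [base_transition_invariant]
  simp [base_transition_pairs, PySem.Dict.getD_counter]
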